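-- pv_equiv track=rewrite | github.com/marlitas/code_challenges | student_height.py | solution
-- ===== SOURCE A (Python) =====
-- def solution(A):
--   dict = {1: list()}
--   for element in A:
--     x = range(len(dict))
--     for n in x:
--         n = n + 1
--         if not dict[n]:
--             dict[n].append(element)
--         elif element < min(dict[n]):
--             dict[n].append(element)
--         elif n == len(dict):
--             dict[n + 1] = [element]
--   return len(dict)
-- ===== SOURCE B (Python) =====
-- def solution(A):
--     # count pile boundaries: a new pile starts exactly at each non-descent step
--     return 1 + sum(b >= a for a, b in zip(A, A[1:]))
-- ===== Notes on version B (the rewrite author's own statement) =====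
-- stated objective: faster
-- what changed: Replaced the dict-of-piles state machine (which rescans every pile and recomputes min() per element) by the observation that the last pile's min always equals the previous element, so the pile count is just 1 + the number of adjacent non-descending steps, computed in one zip pass.
import Mathlib
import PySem

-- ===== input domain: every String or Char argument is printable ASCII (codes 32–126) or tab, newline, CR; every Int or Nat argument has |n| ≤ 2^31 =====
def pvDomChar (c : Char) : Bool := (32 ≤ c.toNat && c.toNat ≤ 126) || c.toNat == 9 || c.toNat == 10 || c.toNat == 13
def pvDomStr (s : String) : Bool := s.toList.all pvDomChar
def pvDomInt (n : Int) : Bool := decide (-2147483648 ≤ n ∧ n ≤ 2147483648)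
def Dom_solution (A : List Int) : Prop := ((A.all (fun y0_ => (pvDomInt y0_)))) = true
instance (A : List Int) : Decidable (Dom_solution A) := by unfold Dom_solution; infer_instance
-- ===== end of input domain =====

-- B replaces A's quadratic pile-placement state machine by one pass counting non-descent steps (alternative, asymptotically faster).

-- ===== PORT A =====
-- the body of A's inner 'for n in x' loop (n = n0 + 1)
def solBody (element : Int) (d' : PySem.Dict Int (List Int)) (n0 : Int) : PySem.Dict Int (List Int) :=
  let n : Int := n0 + 1
  -- dict[n]: key n is always present when this runs (Python's KeyError is unreachable), so getD is exact
  let v := d'.getD n []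
  if v = [] then d'.modify n [] (fun l => l ++ [element])
  else
    match PySem.List.min? v (fun x => x) with
    | none => d'  -- unreachable: v ≠ []
    | some m =>
      if element < m then d'.modify n [] (fun l => l ++ [element])
      else if n = (d'.size : Int) then d'.insert (n + 1) [element]
      else d'

def solution (A : List Int) : Int :=
  ((A.foldl
      (fun d element => (PySem.List.pyRange 0 (d.size : Int)).foldl (solBody element) d)
      ((PySem.Dict.empty).insert 1 ([] : List Int))).size : Int)

-- ===== PORT B =====
def solution_alt (A : List Int) : Int :=
  1 + ((A.zip (PySem.List.slice A (some 1))).map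
        (fun p => if p.1 ≤ p.2 then (1 : Int) else 0)).sum

-- ===== PRECONDITION & SPEC =====
def Spec_solution (A : List Int) (out : Int) : Prop := out = solution_alt A
instance (A : List Int) (out : Int) : Decidable (Spec_solution A out) := by unfold Spec_solution; infer_instance

-- ===== CLAIM (what is proved, stated in full; the proofs are below) =====
def Claim_equal_solution : Prop := ∀ (A : List Int), Dom_solution A → Spec_solution A (solution A)

-- ===== LEMMAS AND PROOFS =====

-- keys 1..k as Ints
def pileKeys (k : Nat) : List Int := (List.range k).map (fun i : Nat => ((i : Int) + 1))

-- state invariant of A's outer loop: piles are keyed 1..k and the last pile's min is m (= the last element seen)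
def SolInv (d : PySem.Dict Int (List Int)) (k : Nat) (m : Int) : Prop :=
  1 ≤ k ∧ d.keys = pileKeys k ∧
  PySem.List.min? (d.getD (k : Int) []) (fun x => x) = some m

-- B's count, in recursive form
def cnt (m : Int) : List Int → Int
  | [] => 0
  | e :: r => (if m ≤ e then 1 else 0) + cnt e r

lemma size_eq_of_keys {d : PySem.Dict Int (List Int)} {k : Nat}
    (h : d.keys = pileKeys k) : d.size = k := by
  have := congrArg List.length h
  simpa [PySem.Dict.keys, PySem.Dict.size, pileKeys] using this

lemma mem_pileKeys {k : Nat} {n : Int} : n ∈ pileKeys k ↔ 1 ≤ n ∧ n ≤ (k : Int) := by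
  unfold pileKeys
  rw [List.mem_map]
  constructor
  · rintro ⟨i, hi, rfl⟩
    rw [List.mem_range] at hi
    omega
  · rintro ⟨h1, h2⟩
    exact ⟨(n - 1).toNat, List.mem_range.mpr (by omega), by omega⟩

lemma min?_append_lt {v : List Int} {m e : Int}
    (hm : PySem.List.min? v (fun x => x) = some m) (he : e < m) :
    PySem.List.min? (v ++ [e]) (fun x => x) = some e := by
  cases v with
  | nil => simp [PySem.List.min?] at hm
  | cons x t =>
    rw [PySem.List.min?_id_cons] at hm
    have hmv : t.foldl min x = m := by injection hm
    rw [List.cons_append, PySem.List.min?_id_cons, List.foldl_append, hmv]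
    simp [min_eq_right (le_of_lt he)]

-- the first k-1 inner-loop steps touch only piles 1..k-1: keys and the last pile are unchanged
lemma prefix_preserves (e : Int) (k : Nat) :
    ∀ (ns : List Int) (d : PySem.Dict Int (List Int)),
      (∀ n0 ∈ ns, 0 ≤ n0 ∧ n0 + 1 < (k : Int)) →
      d.keys = pileKeys k →
      ((ns.foldl (solBody e) d).keys = pileKeys k ∧
       (ns.foldl (solBody e) d).getD (k : Int) [] = d.getD (k : Int) []) := by
  intro ns
  induction ns with
  | nil => intro d _ hk; exact ⟨hk, rfl⟩
  | cons n0 ns ih =>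
    intro d hmem hk
    obtain ⟨h0, hlt⟩ := hmem n0 (List.mem_cons_self ..)
    have hsz : d.size = k := size_eq_of_keys hk
    have hne : (k : Int) ≠ n0 + 1 := by omega
    have hcont : d.contains (n0 + 1) = true := by
      rw [PySem.Dict.contains_iff_mem_keys, hk, mem_pileKeys]; omega
    have hbody : (solBody e d n0).keys = pileKeys k ∧
        (solBody e d n0).getD (k : Int) [] = d.getD (k : Int) [] := by
      simp only [solBody]
      split
      · rw [PySem.Dict.keys_modify, PySem.Dict.keys_insert_of_contains _ _ hcont,
          PySem.Dict.getD_modify_of_ne _ _ _ hne]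
        exact ⟨hk, rfl⟩
      · split
        · exact ⟨hk, rfl⟩
        · split
          · rw [PySem.Dict.keys_modify, PySem.Dict.keys_insert_of_contains _ _ hcont,
              PySem.Dict.getD_modify_of_ne _ _ _ hne]
            exact ⟨hk, rfl⟩
          · split
            · omega
            · exact ⟨hk, rfl⟩
    rw [List.foldl_cons]
    have := ih (solBody e d n0) (fun n hn => hmem n (List.mem_cons_of_mem _ hn)) hbody.1
    exact ⟨this.1, this.2.trans hbody.2⟩

-- one outer step: the pile count grows iff e ≥ the last pile's min, and the new last min is e
lemma step_inv {d : PySem.Dict Int (List Int)} {k : Nat} {m : Int} (e : Int)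
    (h : SolInv d k m) :
    SolInv ((PySem.List.pyRange 0 (d.size : Int)).foldl (solBody e) d)
        (if e < m then k else k + 1) e := by
  obtain ⟨hk1, hkeys, hmin⟩ := h
  have hsz : d.size = k := size_eq_of_keys hkeys
  have hdec : PySem.List.pyRange 0 (d.size : Int) =
      PySem.List.pyRange 0 ((k : Int) - 1) ++ [(k : Int) - 1] := by
    conv_lhs => rw [hsz, show ((k : Int)) = ((k : Int) - 1) + 1 from by omega]
    rw [PySem.List.pyRange_one_succ_right (by omega)]
  rw [hdec, List.foldl_append]
  obtain ⟨hk', hv'⟩ := prefix_preserves e k (PySem.List.pyRange 0 ((k : Int) - 1)) d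
    (fun n0 hn => by rw [PySem.List.mem_pyRange_one] at hn; omega) hkeys
  set d₁ := (PySem.List.pyRange 0 ((k : Int) - 1)).foldl (solBody e) d with hd₁
  have hsz₁ : d₁.size = k := size_eq_of_keys hk'
  have hkk : ((k : Int) - 1) + 1 = (k : Int) := by omega
  have hvne : d.getD (k : Int) [] ≠ [] := by
    intro hnil
    rw [hnil] at hmin
    simp [PySem.List.min?] at hmin
  have hcontk : d₁.contains ((k : Int)) = true := by
    rw [PySem.Dict.contains_iff_mem_keys, hk', mem_pileKeys]; omega
  simp only [List.foldl_cons, List.foldl_nil, solBody, hkk, hv', hmin]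
  rw [if_neg hvne]
  split_ifs with hlt hn
  · -- e < m : append to the last pile, count unchanged
    refine ⟨by omega, ?_, ?_⟩
    · rw [PySem.Dict.keys_modify, PySem.Dict.keys_insert_of_contains _ _ hcontk]
      exact hk'
    · rw [PySem.Dict.getD_modify_self, hv']
      exact min?_append_lt hmin hlt
  · -- e ≥ m and n = len(dict) : open a new pile
    have hncont : d₁.contains ((k : Int) + 1) = false := by
      rw [← Bool.not_eq_true, PySem.Dict.contains_iff_mem_keys, hk', mem_pileKeys]
      omega
    refine ⟨by omega, ?_, ?_⟩
    · rw [PySem.Dict.keys_insert_of_not_contains _ _ hncont, hk']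
      unfold pileKeys
      rw [List.range_succ, List.map_append]
      simp
    · have hc : ((k + 1 : Nat) : Int) = (k : Int) + 1 := by push_cast; ring
      rw [hc, PySem.Dict.getD_insert_self, PySem.List.min?_id_cons]
      simp
  · exact absurd (by rw [hsz₁]) hn

-- the outer loop from any invariant state
lemma outer (rest : List Int) :
    ∀ (d : PySem.Dict Int (List Int)) (k : Nat) (m : Int), SolInv d k m →
      (((rest.foldl
          (fun d element => (PySem.List.pyRange 0 (d.size : Int)).foldl (solBody element) d)
          d).size : Int)) = (k : Int) + cnt m rest := by
  induction rest with
  | nil =>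
    intro d k m h
    simp [cnt, size_eq_of_keys h.2.1]
  | cons e r ih =>
    intro d k m h
    rw [List.foldl_cons]
    have hstep := step_inv e h
    by_cases hlt : e < m
    · rw [if_pos hlt] at hstep
      rw [ih _ _ _ hstep]
      simp [cnt, not_le.mpr hlt]
    · rw [if_neg hlt] at hstep
      rw [ih _ _ _ hstep]
      simp only [cnt, if_pos (not_lt.mp hlt)]
      push_cast; ring

-- the first element fills the initially empty pile 1
lemma base_inv (a : Int) :
    SolInv ((PySem.List.pyRange 0 ((((PySem.Dict.empty).insert (1 : Int) ([] : List Int)).size : Nat) : Int)).foldl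
          (solBody a) ((PySem.Dict.empty).insert (1 : Int) ([] : List Int))) 1 a := by
  have h2 : PySem.List.pyRange 0 ((((PySem.Dict.empty).insert (1 : Int) ([] : List Int)).size : Nat) : Int) = [0] := by
    decide
  rw [h2]
  simp only [List.foldl_cons, List.foldl_nil, solBody]
  have h3 : ((PySem.Dict.empty).insert (1 : Int) ([] : List Int)).getD (0 + 1) [] = [] := by decide
  rw [h3, if_pos rfl]
  refine ⟨le_refl 1, ?_, ?_⟩
  · rw [PySem.Dict.keys_modify, PySem.Dict.keys_insert_of_contains _ _
      (by decide : ((PySem.Dict.empty).insert (1 : Int) ([] : List Int)).contains (0 + 1) = true)]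
    decide
  · rw [show ((1 : Nat) : Int) = (0 + 1 : Int) from by norm_num, PySem.Dict.getD_modify_self, h3,
      List.nil_append, PySem.List.min?_id_cons]
    simp

-- B's zip-sum equals the recursive count
lemma zip_sum_eq_cnt (rest : List Int) :
    ∀ (m : Int),
      (((m :: rest).zip rest).map (fun p => if p.1 ≤ p.2 then (1 : Int) else 0)).sum
        = cnt m rest := by
  induction rest with
  | nil => intro m; simp [cnt]
  | cons e r ih =>
    intro m
    simp only [List.zip_cons_cons, List.map_cons, List.sum_cons, cnt, ih e]

-- ===== VERDICT (by name: the statement is the Claim_ definition above) =====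
theorem solution_spec : Claim_equal_solution := by
  unfold Claim_equal_solution
  intro A _
  unfold Spec_solution
  cases A with
  | nil => decide
  | cons a rest =>
    unfold solution solution_alt
    rw [List.foldl_cons]
    refine Eq.trans (outer rest _ 1 a (base_inv a)) ?_
    rw [PySem.List.slice_from _ (by norm_num : (0:Int) ≤ 1)]
    simp only [Int.toNat_one, List.drop_one, List.tail_cons]
    rw [zip_sum_eq_cnt rest a]
    push_cast; ring
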